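-- pv_equiv track=rewrite | github.com/crawfordk37/GA-Tech-HW | HW4.py | polyAlphaCipher
-- ===== SOURCE A (Python) =====
-- def polyAlphaCipher(string, increment):
--     newString = "" ##sets up the string that will be output
--     change = 1 ##sets the first change
--     for character in string: ##cycles through each character
--         num = ord(character) ##breaks the character down into the ASCII character code
--         num += change%255 ##changes the code by some amount less than or equal to 255
--         newString += chr(num) ##adds the new character (found from the edited character code) to the output string
--         change += increment ##increases the change by the set increment
--     return newString
-- ===== SOURCE B (Python) =====
-- def polyAlphaCipher(string, increment):
--     # The shift applied at position i is (1 + i*increment) % 255, which is periodic in i: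
--     # precompute the cycle of shift values once (at most 255 entries), then translate
--     # the string through the table by i % period.
--     step = increment % 255
--     shifts = [1 % 255]
--     s = (1 + step) % 255
--     while s != shifts[0]:
--         shifts.append(s)
--         s = (s + step) % 255
--     p = len(shifts)
--     return "".join(chr(ord(c) + shifts[i % p]) for i, c in enumerate(string))
-- ===== Notes on version B (the rewrite author's own statement) =====
-- stated objective: alternative
-- what changed: Instead of threading a running change accumulator through every character, B exploits the periodicity of the shift sequence mod 255: it precomputes the cycle of shift values once (a table of at most 255 entries built by iterating until the start value recurs) and then translates each character via table[i % period].
import Mathlib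
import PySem

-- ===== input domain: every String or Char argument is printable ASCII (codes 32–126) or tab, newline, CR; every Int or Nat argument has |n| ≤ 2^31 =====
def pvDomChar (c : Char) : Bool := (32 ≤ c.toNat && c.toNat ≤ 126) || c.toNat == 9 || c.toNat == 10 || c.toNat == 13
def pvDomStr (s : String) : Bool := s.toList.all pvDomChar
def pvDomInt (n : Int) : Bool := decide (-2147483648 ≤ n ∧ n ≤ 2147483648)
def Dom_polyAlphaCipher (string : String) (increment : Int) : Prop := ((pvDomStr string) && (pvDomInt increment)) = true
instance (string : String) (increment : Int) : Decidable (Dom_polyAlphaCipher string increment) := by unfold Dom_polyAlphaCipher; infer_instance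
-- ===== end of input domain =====

-- B replaces A's per-character running accumulator by precomputing the periodic cycle of
-- shift values mod 255 once and translating each character through that table by i % period;
-- objective: alternative algorithm of the same cost.

-- ===== PORT A =====
-- chr(num): num = ord(c) + change % 255 is always ≥ 0 and < 0x110000 here, so Char.ofNat num.toNat is exact
def polyAlphaCipher (string : String) (increment : Int) : String :=
  let r := string.toList.foldl
    (fun (st : List Char × Int) character =>
      let num : Int := (character.toNat : Int) + PySem.Int.mod st.2 255
      (st.1 ++ [Char.ofNat num.toNat], st.2 + increment))
    ([], 1)
  String.mk r.1

-- ===== PORT B =====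
-- the while loop `while s != shifts[0]: shifts.append(s); s = (s + step) % 255`;
-- the fuel 256 only makes it total: the loop stops via the s = first test within 255 iterations
-- (proved in buildShifts_inv below), so the fuel is never exhausted.
def buildShifts (step : Int) (first : Int) : List Int → Int → Nat → List Int
  | acc, _, 0 => acc
  | acc, s, fuel+1 =>
    if s = first then acc
    else buildShifts step first (acc ++ [s]) (PySem.Int.mod (s + step) 255) fuel

-- shifts[i % p]: the index is nonnegative and < len(shifts), so pyGetD with default 0 is exact
def polyAlphaCipher_alt (string : String) (increment : Int) : String :=
  let step := PySem.Int.mod increment 255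
  let first := PySem.Int.mod 1 255
  let shifts := buildShifts step first [first] (PySem.Int.mod (1 + step) 255) 256
  let p : Int := (shifts.length : Int)
  String.mk ((PySem.List.enumerate string.toList).map
    (fun q => Char.ofNat ((q.2.toNat : Int) + PySem.List.pyGetD shifts (PySem.Int.mod q.1 p) 0).toNat))

-- ===== PRECONDITION & SPEC =====
def Spec_polyAlphaCipher (string : String) (increment : Int) (out : String) : Prop := out = polyAlphaCipher_alt string increment
instance (string : String) (increment : Int) (out : String) : Decidable (Spec_polyAlphaCipher string increment out) := by unfold Spec_polyAlphaCipher; infer_instance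

-- ===== CLAIM (what is proved, stated in full; the proofs are below) =====
def Claim_equal_polyAlphaCipher : Prop := ∀ (string : String) (increment : Int), Dom_polyAlphaCipher string increment → Spec_polyAlphaCipher string increment (polyAlphaCipher string increment)

-- ===== LEMMAS AND PROOFS =====

-- A's loop: after starting with change = c at enumerate-start `start`, the accumulated
-- characters are the closed-form map with shift (c + (index - start)*increment) % 255
theorem polyAlphaCipher_loop (increment : Int) :
    ∀ (l : List Char) (acc : List Char) (c : Int) (start : Int),
      (l.foldl
        (fun (st : List Char × Int) character =>
          let num : Int := (character.toNat : Int) + PySem.Int.mod st.2 255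
          (st.1 ++ [Char.ofNat num.toNat], st.2 + increment))
        (acc, c)).1
      = acc ++ (PySem.List.enumerate l start).map
          (fun p => Char.ofNat ((p.2.toNat : Int) + PySem.Int.mod (c + (p.1 - start) * increment) 255).toNat) := by
  intro l
  induction l with
  | nil => intro acc c start; simp [PySem.List.enumerate_nil]
  | cons x xs ih =>
    intro acc c start
    rw [List.foldl_cons, PySem.List.enumerate_cons]
    rw [ih _ (c + increment) (start + 1)]
    simp only [List.map_cons]
    rw [List.append_assoc, List.singleton_append]
    congr 2
    · have h : c + (start - start) * increment = c := by ring
      rw [h]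
    · apply List.map_congr_left
      intro p _
      have h : c + increment + (p.1 - (start + 1)) * increment
             = c + (p.1 - start) * increment := by ring
      rw [h]

-- B's while loop terminates via its stop test and produces the table of the first p shift
-- values, where p*step ≡ 0 (mod 255)
theorem buildShifts_inv (step : Int) :
    ∀ (fuel k : Nat), 1 ≤ k → 256 ≤ k + fuel →
      (∀ j : Nat, 1 ≤ j → j < k → (1 + (j : Int) * step) % 255 ≠ 1) →
      ∃ p : Nat, 1 ≤ p ∧ ((p : Int) * step) % 255 = 0 ∧
        buildShifts step 1 ((List.range k).map (fun (j : Nat) => (1 + (j : Int) * step) % 255))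
          ((1 + (k : Int) * step) % 255) fuel
        = (List.range p).map (fun (j : Nat) => (1 + (j : Int) * step) % 255) := by
  intro fuel
  induction fuel with
  | zero =>
    intro k hk hfuel hnot
    exfalso
    apply hnot 255 (by omega) (by omega)
    have : ∀ a : Int, (1 + 255 * a) % 255 = 1 := by intro a; omega
    exact_mod_cast this step
  | succ fuel ih =>
    intro k hk hfuel hnot
    rw [buildShifts]
    by_cases hs : (1 + (k : Int) * step) % 255 = 1
    · rw [if_pos hs]
      refine ⟨k, hk, ?_, rfl⟩
      have h255 : ∀ a : Int, (1 + a) % 255 = 1 → a % 255 = 0 := by intro a; omega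
      exact h255 _ hs
    · rw [if_neg hs]
      have hacc : (List.range k).map (fun (j : Nat) => (1 + (j : Int) * step) % 255)
          ++ [(1 + (k : Int) * step) % 255]
          = (List.range (k+1)).map (fun (j : Nat) => (1 + (j : Int) * step) % 255) := by
        rw [List.range_succ, List.map_append]; rfl
      have hmod : PySem.Int.mod ((1 + (k : Int) * step) % 255 + step) 255
          = (1 + ((k+1 : Nat) : Int) * step) % 255 := by
        rw [PySem.Int.mod_eq_emod_of_pos (by norm_num)]
        have h1 : (1 : Int) + ((k+1 : Nat) : Int) * step = (1 + (k : Int) * step) + step := by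
          push_cast; ring
        rw [h1]
        have h2 : ∀ a b : Int, (a % 255 + b) % 255 = (a + b) % 255 := by intro a b; omega
        exact h2 _ _
      rw [hacc, hmod]
      exact ih (k+1) (by omega) (by omega)
        (fun j h1 h2 => by
          rcases Nat.lt_succ_iff_lt_or_eq.mp h2 with h | h
          · exact hnot j h1 h
          · subst h; exact hs)

-- indexing the table by i % p recovers the closed-form shift (1 + i*step) % 255
theorem getD_shifts (step : Int) (p : Nat) (hp : 1 ≤ p) (h0 : ((p : Int) * step) % 255 = 0)
    (i : Int) (_hi : 0 ≤ i) :
    PySem.List.pyGetD ((List.range p).map (fun (j : Nat) => (1 + (j : Int) * step) % 255))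
      (PySem.Int.mod i (p : Int)) 0
    = (1 + i * step) % 255 := by
  have hppos : (0 : Int) < (p : Int) := by exact_mod_cast hp
  rw [PySem.Int.mod_eq_emod_of_pos hppos]
  have hr0 : 0 ≤ i % (p : Int) := Int.emod_nonneg i (by omega)
  have hr1 : i % (p : Int) < (p : Int) := Int.emod_lt_of_pos i hppos
  rw [PySem.List.pyGetD_of_nonneg _ _ hr0]
  have hlt : (i % (p : Int)).toNat < p := by omega
  rw [PySem.List.getD_map_range _ _ _ _ (by simpa using hlt)]
  have hcast : (((i % (p : Int)).toNat : Int)) = i % (p : Int) := Int.toNat_of_nonneg hr0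
  rw [hcast]
  -- (1 + (i % p) * step) % 255 = (1 + i * step) % 255 since p*step ≡ 0 (mod 255)
  obtain ⟨t, ht⟩ : (255 : Int) ∣ (p : Int) * step := Int.dvd_of_emod_eq_zero h0
  have hdiv := Int.mul_ediv_add_emod i (p : Int)
  have key : 1 + i * step = (1 + (i % (p : Int)) * step) + 255 * ((i / (p : Int)) * t) := by
    linear_combination step * hdiv.symm + (i / (p : Int)) * ht
  rw [key]
  have h2 : ∀ a b : Int, (a + 255 * b) % 255 = a % 255 := by intro a b; omega
  rw [h2]

-- replacing increment by step = increment % 255 does not change the shift mod 255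
theorem step_shift (increment i : Int) :
    (1 + i * (increment % 255)) % 255 = (1 + i * increment) % 255 := by
  have h1 : increment % 255 ≡ increment [ZMOD 255] := Int.emod_emod_of_dvd increment dvd_rfl
  exact (h1.mul_left i).add_left 1

theorem polyAlphaCipher_spec : Claim_equal_polyAlphaCipher := by
  intro string increment _
  show polyAlphaCipher string increment = polyAlphaCipher_alt string increment
  simp only [polyAlphaCipher, polyAlphaCipher_alt]
  rw [polyAlphaCipher_loop increment string.toList [] 1 0]
  simp only [List.nil_append]
  have hm1 : PySem.Int.mod 1 255 = 1 := by decide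
  rw [hm1]
  set step := PySem.Int.mod increment 255 with hstepdef
  have hstep : step = increment % 255 := PySem.Int.mod_eq_emod_of_pos (by norm_num)
  -- build-loop characterisation, entered with acc = [1] = map over range 1, s for k = 1
  have hinit : ([1] : List Int) = (List.range 1).map (fun (j : Nat) => (1 + (j : Int) * step) % 255) := by
    simp
  have hs1 : PySem.Int.mod (1 + step) 255 = (1 + ((1 : Nat) : Int) * step) % 255 := by
    rw [PySem.Int.mod_eq_emod_of_pos (by norm_num)]; norm_num
  obtain ⟨p, hp, h0, hbuild⟩ := buildShifts_inv step 256 1 (by omega) (by omega)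
    (fun j h1 h2 => absurd h1 (by omega))
  rw [hinit, hs1, hbuild]
  congr 1
  apply List.map_congr_left
  intro q hq
  obtain ⟨k, hk, rfl⟩ := (PySem.List.mem_enumerate_iff _ _ _).mp hq
  simp only [zero_add, sub_zero]
  congr 2
  simp only [List.length_map, List.length_range]
  rw [getD_shifts step p hp h0 (k : Int) (by positivity),
      PySem.Int.mod_eq_emod_of_pos (b := 255) (by norm_num), hstep, step_shift]
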